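-- pv_equiv track=rewrite | github.com/LingyeSoul/ComfyUI_LLM_SDXL_Adapter_Turbo | verify_adapter.py | analyze_adapter_keys
-- ===== SOURCE A (Python) =====
-- EXPECTED_NEW_FORMAT_KEYS = {
--     # Wide attention blocks (3 blocks with q/k/v/out proj)
--     "wide_attention_blocks.0.q_proj.weight", "wide_attention_blocks.0.q_proj.bias",
--     "wide_attention_blocks.0.k_proj.weight", "wide_attention_blocks.0.k_proj.bias",
--     "wide_attention_blocks.0.v_proj.weight", "wide_attention_blocks.0.v_proj.bias",
--     "wide_attention_blocks.0.out_proj.weight", "wide_attention_blocks.0.out_proj.bias",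
--     "wide_attention_blocks.1.q_proj.weight", "wide_attention_blocks.1.q_proj.bias",
--     "wide_attention_blocks.1.k_proj.weight", "wide_attention_blocks.1.k_proj.bias",
--     "wide_attention_blocks.1.v_proj.weight", "wide_attention_blocks.1.v_proj.bias",
--     "wide_attention_blocks.1.out_proj.weight", "wide_attention_blocks.1.out_proj.bias",
--     "wide_attention_blocks.2.q_proj.weight", "wide_attention_blocks.2.q_proj.bias",
--     "wide_attention_blocks.2.k_proj.weight", "wide_attention_blocks.2.k_proj.bias",
--     "wide_attention_blocks.2.v_proj.weight", "wide_attention_blocks.2.v_proj.bias",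
--     "wide_attention_blocks.2.out_proj.weight", "wide_attention_blocks.2.out_proj.bias",
--
--     # Narrow attention blocks (3 blocks with q/k/v/out proj)
--     "narrow_attention_blocks.0.q_proj.weight", "narrow_attention_blocks.0.q_proj.bias",
--     "narrow_attention_blocks.0.k_proj.weight", "narrow_attention_blocks.0.k_proj.bias",
--     "narrow_attention_blocks.0.v_proj.weight", "narrow_attention_blocks.0.v_proj.bias",
--     "narrow_attention_blocks.0.out_proj.weight", "narrow_attention_blocks.0.out_proj.bias",
--     "narrow_attention_blocks.1.q_proj.weight", "narrow_attention_blocks.1.q_proj.bias",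
--     "narrow_attention_blocks.1.k_proj.weight", "narrow_attention_blocks.1.k_proj.bias",
--     "narrow_attention_blocks.1.v_proj.weight", "narrow_attention_blocks.1.v_proj.bias",
--     "narrow_attention_blocks.1.out_proj.weight", "narrow_attention_blocks.1.out_proj.bias",
--     "narrow_attention_blocks.2.q_proj.weight", "narrow_attention_blocks.2.q_proj.bias",
--     "narrow_attention_blocks.2.k_proj.weight", "narrow_attention_blocks.2.k_proj.bias",
--     "narrow_attention_blocks.2.v_proj.weight", "narrow_attention_blocks.2.v_proj.bias",
--     "narrow_attention_blocks.2.out_proj.weight", "narrow_attention_blocks.2.out_proj.bias",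
--
--     # Compression attention
--     "compression_q_proj.weight", "compression_q_proj.bias",
--     "compression_k_proj.weight", "compression_k_proj.bias",
--     "compression_v_proj.weight", "compression_v_proj.bias",
--     "compression_out_proj.weight", "compression_out_proj.bias",
--
--     # Pooling attention
--     "pooling_q_proj.weight", "pooling_q_proj.bias",
--     "pooling_k_proj.weight", "pooling_k_proj.bias",
--     "pooling_v_proj.weight", "pooling_v_proj.bias",
--     "pooling_out_proj.weight", "pooling_out_proj.bias",
-- }
--
-- OLD_FORMAT_PATTERNS = [
--     ".attn.in_proj",      # e.g., wide_attention_blocks.0.attn.in_proj_weight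
--     ".attn.out_proj",     # e.g., wide_attention_blocks.0.attn.out_proj.weight
--     "compression_attention.",  # e.g., compression_attention.q_proj.weight
--     "pooling_attention.",      # e.g., pooling_attention.q_proj.weight
-- ]
--
-- def analyze_adapter_keys(keys):
--     """分析 adapter 文件的键名格式"""
--     result = {
--         'old_format_keys': [],
--         'new_format_keys': [],
--         'other_keys': [],
--         'compression_pooling_old': [],
--         'compression_pooling_new': [],
--     }
--
--     for key in keys:
--         # 检查是否是旧格式
--         is_old_format = any(pattern in key for pattern in OLD_FORMAT_PATTERNS)
--
--         if is_old_format: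
--             result['old_format_keys'].append(key)
--             if "compression_attention." in key or "pooling_attention." in key:
--                 result['compression_pooling_old'].append(key)
--         elif key in EXPECTED_NEW_FORMAT_KEYS:
--             result['new_format_keys'].append(key)
--             if key.startswith("compression_") or key.startswith("pooling_"):
--                 result['compression_pooling_new'].append(key)
--         else:
--             result['other_keys'].append(key)
--
--     return result
-- ===== SOURCE B (Python) =====
-- EXPECTED_NEW_FORMAT_KEYS = {
--     "wide_attention_blocks.0.q_proj.weight", "wide_attention_blocks.0.q_proj.bias",
--     "wide_attention_blocks.0.k_proj.weight", "wide_attention_blocks.0.k_proj.bias",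
--     "wide_attention_blocks.0.v_proj.weight", "wide_attention_blocks.0.v_proj.bias",
--     "wide_attention_blocks.0.out_proj.weight", "wide_attention_blocks.0.out_proj.bias",
--     "wide_attention_blocks.1.q_proj.weight", "wide_attention_blocks.1.q_proj.bias",
--     "wide_attention_blocks.1.k_proj.weight", "wide_attention_blocks.1.k_proj.bias",
--     "wide_attention_blocks.1.v_proj.weight", "wide_attention_blocks.1.v_proj.bias",
--     "wide_attention_blocks.1.out_proj.weight", "wide_attention_blocks.1.out_proj.bias",
--     "wide_attention_blocks.2.q_proj.weight", "wide_attention_blocks.2.q_proj.bias",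
--     "wide_attention_blocks.2.k_proj.weight", "wide_attention_blocks.2.k_proj.bias",
--     "wide_attention_blocks.2.v_proj.weight", "wide_attention_blocks.2.v_proj.bias",
--     "wide_attention_blocks.2.out_proj.weight", "wide_attention_blocks.2.out_proj.bias",
--     "narrow_attention_blocks.0.q_proj.weight", "narrow_attention_blocks.0.q_proj.bias",
--     "narrow_attention_blocks.0.k_proj.weight", "narrow_attention_blocks.0.k_proj.bias",
--     "narrow_attention_blocks.0.v_proj.weight", "narrow_attention_blocks.0.v_proj.bias",
--     "narrow_attention_blocks.0.out_proj.weight", "narrow_attention_blocks.0.out_proj.bias",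
--     "narrow_attention_blocks.1.q_proj.weight", "narrow_attention_blocks.1.q_proj.bias",
--     "narrow_attention_blocks.1.k_proj.weight", "narrow_attention_blocks.1.k_proj.bias",
--     "narrow_attention_blocks.1.v_proj.weight", "narrow_attention_blocks.1.v_proj.bias",
--     "narrow_attention_blocks.1.out_proj.weight", "narrow_attention_blocks.1.out_proj.bias",
--     "narrow_attention_blocks.2.q_proj.weight", "narrow_attention_blocks.2.q_proj.bias",
--     "narrow_attention_blocks.2.k_proj.weight", "narrow_attention_blocks.2.k_proj.bias",
--     "narrow_attention_blocks.2.v_proj.weight", "narrow_attention_blocks.2.v_proj.bias",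
--     "narrow_attention_blocks.2.out_proj.weight", "narrow_attention_blocks.2.out_proj.bias",
--     "compression_q_proj.weight", "compression_q_proj.bias",
--     "compression_k_proj.weight", "compression_k_proj.bias",
--     "compression_v_proj.weight", "compression_v_proj.bias",
--     "compression_out_proj.weight", "compression_out_proj.bias",
--     "pooling_q_proj.weight", "pooling_q_proj.bias",
--     "pooling_k_proj.weight", "pooling_k_proj.bias",
--     "pooling_v_proj.weight", "pooling_v_proj.bias",
--     "pooling_out_proj.weight", "pooling_out_proj.bias",
-- }
--
-- OLD_FORMAT_PATTERNS = [
--     ".attn.in_proj",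
--     ".attn.out_proj",
--     "compression_attention.",
--     "pooling_attention.",
-- ]
--
--
-- def _is_old(key):
--     return any(pattern in key for pattern in OLD_FORMAT_PATTERNS)
--
--
-- def analyze_adapter_keys(keys):
--     """分析 adapter 文件的键名格式"""
--     ks = list(keys)
--     old = [k for k in ks if _is_old(k)]
--     new = [k for k in ks if not _is_old(k) and k in EXPECTED_NEW_FORMAT_KEYS]
--     other = [k for k in ks if not _is_old(k) and k not in EXPECTED_NEW_FORMAT_KEYS]
--     return {
--         'old_format_keys': old,
--         'new_format_keys': new,
--         'other_keys': other,
--         'compression_pooling_old': [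
--             k for k in old
--             if "compression_attention." in k or "pooling_attention." in k
--         ],
--         'compression_pooling_new': [
--             k for k in new
--             if k.startswith("compression_") or k.startswith("pooling_")
--         ],
--     }
-- ===== Notes on version B (the rewrite author's own statement) =====
-- stated objective: simpler
-- what changed: Replaced the single stateful loop that appends into five bucket lists with declarative filter comprehensions: the three disjoint buckets are filters over the input, and the two compression/pooling subsets are derived by filtering the already-built bucket lists instead of being maintained inside the loop.
import Mathlib
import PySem

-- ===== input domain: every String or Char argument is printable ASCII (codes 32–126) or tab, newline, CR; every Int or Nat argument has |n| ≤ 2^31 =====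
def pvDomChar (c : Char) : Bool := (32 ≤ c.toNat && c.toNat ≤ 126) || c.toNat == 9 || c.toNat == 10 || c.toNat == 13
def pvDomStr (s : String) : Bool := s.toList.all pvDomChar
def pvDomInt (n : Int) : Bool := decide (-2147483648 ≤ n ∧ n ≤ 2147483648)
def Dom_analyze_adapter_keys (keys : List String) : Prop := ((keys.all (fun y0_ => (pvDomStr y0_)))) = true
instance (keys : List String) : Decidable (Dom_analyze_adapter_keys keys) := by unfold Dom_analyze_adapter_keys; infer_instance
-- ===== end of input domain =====

-- B replaces A's five-accumulator loop by filter comprehensions over the input and over the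
-- bucket lists (same cost; objective: simpler, declarative decomposition).


-- shared module constants (the Python module's OLD_FORMAT_PATTERNS / EXPECTED_NEW_FORMAT_KEYS)
def pvOldPatterns : List String := [".attn.in_proj", ".attn.out_proj", "compression_attention.", "pooling_attention."]

def pvExpectedNew : PySem.Set String := PySem.Set.ofList ["compression_k_proj.bias", "compression_k_proj.weight", "compression_out_proj.bias", "compression_out_proj.weight", "compression_q_proj.bias", "compression_q_proj.weight", "compression_v_proj.bias", "compression_v_proj.weight", "narrow_attention_blocks.0.k_proj.bias", "narrow_attention_blocks.0.k_proj.weight", "narrow_attention_blocks.0.out_proj.bias", "narrow_attention_blocks.0.out_proj.weight", "narrow_attention_blocks.0.q_proj.bias", "narrow_attention_blocks.0.q_proj.weight", "narrow_attention_blocks.0.v_proj.bias", "narrow_attention_blocks.0.v_proj.weight", "narrow_attention_blocks.1.k_proj.bias", "narrow_attention_blocks.1.k_proj.weight", "narrow_attention_blocks.1.out_proj.bias", "narrow_attention_blocks.1.out_proj.weight", "narrow_attention_blocks.1.q_proj.bias", "narrow_attention_blocks.1.q_proj.weight", "narrow_attention_blocks.1.v_proj.bias", "narrow_attention_blocks.1.v_proj.weight",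 "narrow_attention_blocks.2.k_proj.bias", "narrow_attention_blocks.2.k_proj.weight", "narrow_attention_blocks.2.out_proj.bias", "narrow_attention_blocks.2.out_proj.weight", "narrow_attention_blocks.2.q_proj.bias", "narrow_attention_blocks.2.q_proj.weight", "narrow_attention_blocks.2.v_proj.bias", "narrow_attention_blocks.2.v_proj.weight", "pooling_k_proj.bias", "pooling_k_proj.weight", "pooling_out_proj.bias", "pooling_out_proj.weight", "pooling_q_proj.bias", "pooling_q_proj.weight", "pooling_v_proj.bias", "pooling_v_proj.weight", "wide_attention_blocks.0.k_proj.bias", "wide_attention_blocks.0.k_proj.weight", "wide_attention_blocks.0.out_proj.bias", "wide_attention_blocks.0.out_proj.weight", "wide_attention_blocks.0.q_proj.bias", "wide_attention_blocks.0.q_proj.weight", "wide_attention_blocks.0.v_proj.bias", "wide_attention_blocks.0.v_proj.weight", "wide_attention_blocks.1.k_proj.bias", "wide_attention_blocks.1.k_proj.weight", "wide_attention_blocks.1.out_proj.bias", "wide_attention_blocks.1.out_proj.weight", "wide_attention_blocks.1.q_proj.bias", "wide_attention_blocks.1.q_proj.weight", "wide_attention_blocks.1.v_proj.bias", "wide_attention_blocks.1.v_proj.weight",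 "wide_attention_blocks.2.k_proj.bias", "wide_attention_blocks.2.k_proj.weight", "wide_attention_blocks.2.out_proj.bias", "wide_attention_blocks.2.out_proj.weight", "wide_attention_blocks.2.q_proj.bias", "wide_attention_blocks.2.q_proj.weight", "wide_attention_blocks.2.v_proj.bias", "wide_attention_blocks.2.v_proj.weight"]

-- 'any(pattern in key for pattern in OLD_FORMAT_PATTERNS)'
def pvIsOld (key : String) : Bool := pvOldPatterns.any (fun pattern => PySem.Str.isIn pattern key)
-- '"compression_attention." in key or "pooling_attention." in key'
def pvIsCPOld (key : String) : Bool := PySem.Str.isIn "compression_attention." key || PySem.Str.isIn "pooling_attention." key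
-- 'key.startswith("compression_") or key.startswith("pooling_")'
def pvIsCPNew (key : String) : Bool := PySem.Str.startswith key "compression_" || PySem.Str.startswith key "pooling_"

-- ===== PORT A =====
-- A's loop body: one step of the for-loop updating the five bucket lists of the result dict.
def pvStepA (st : List String × List String × List String × List String × List String) (key : String) :
    List String × List String × List String × List String × List String :=
  let (old, nw, oth, cpo, cpn) := st
  if pvIsOld key then
    (old ++ [key], nw, oth, if pvIsCPOld key then cpo ++ [key] else cpo, cpn)
  else if PySem.Set.contains pvExpectedNew key then
    (old, nw ++ [key], oth, cpo, if pvIsCPNew key then cpn ++ [key] else cpn)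
  else
    (old, nw, oth ++ [key], cpo, cpn)

def analyze_adapter_keys (keys : List String) : List (String × List String) :=
  let r := keys.foldl pvStepA ([], [], [], [], [])
  [("old_format_keys", r.1), ("new_format_keys", r.2.1), ("other_keys", r.2.2.1),
   ("compression_pooling_old", r.2.2.2.1), ("compression_pooling_new", r.2.2.2.2)]

-- ===== PORT B =====
def analyze_adapter_keys_alt (keys : List String) : List (String × List String) :=
  let old := keys.filter (fun k => pvIsOld k)
  let nw := keys.filter (fun k => !pvIsOld k && PySem.Set.contains pvExpectedNew k)
  let oth := keys.filter (fun k => !pvIsOld k && !PySem.Set.contains pvExpectedNew k)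
  [("old_format_keys", old), ("new_format_keys", nw), ("other_keys", oth),
   ("compression_pooling_old", old.filter (fun k => pvIsCPOld k)),
   ("compression_pooling_new", nw.filter (fun k => pvIsCPNew k))]

-- ===== PRECONDITION & SPEC =====
def Spec_analyze_adapter_keys (keys : List String) (out : List (String × List String)) : Prop := out = analyze_adapter_keys_alt keys
instance (keys : List String) (out : List (String × List String)) : Decidable (Spec_analyze_adapter_keys keys out) := by unfold Spec_analyze_adapter_keys; infer_instance

-- ===== CLAIM (what is proved, stated in full; the proofs are below) =====
def Claim_equal_analyze_adapter_keys : Prop := ∀ (keys : List String), Dom_analyze_adapter_keys keys → Spec_analyze_adapter_keys keys (analyze_adapter_keys keys)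

-- ===== LEMMAS AND PROOFS =====

-- Loop invariant: A's fold appends, to each accumulator component, exactly the corresponding filter of the remaining keys.
theorem pvFoldA_eq (keys : List String) (a b c d e : List String) :
    keys.foldl pvStepA (a, b, c, d, e) =
      (a ++ keys.filter (fun k => pvIsOld k),
       b ++ keys.filter (fun k => !pvIsOld k && PySem.Set.contains pvExpectedNew k),
       c ++ keys.filter (fun k => !pvIsOld k && !PySem.Set.contains pvExpectedNew k),
       d ++ (keys.filter (fun k => pvIsOld k)).filter (fun k => pvIsCPOld k),
       e ++ (keys.filter (fun k => !pvIsOld k && PySem.Set.contains pvExpectedNew k)).filter (fun k => pvIsCPNew k)) := by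
  induction keys generalizing a b c d e with
  | nil => simp
  | cons k ks ih =>
    simp only [List.foldl_cons, List.filter_cons, pvStepA]
    by_cases h1 : pvIsOld k
    · by_cases h2 : pvIsCPOld k <;> simp [h1, h2, ih, List.filter_filter]
    · by_cases h2 : k ∈ pvExpectedNew
      · by_cases h3 : pvIsCPNew k <;> simp [h1, h2, h3, ih, List.filter_filter]
      · simp [h1, h2, ih, List.filter_filter]

-- ===== VERDICT (by name: the statement is the Claim_ definition above) =====
theorem analyze_adapter_keys_spec : Claim_equal_analyze_adapter_keys := by
  intro keys _
  unfold Spec_analyze_adapter_keys analyze_adapter_keys analyze_adapter_keys_alt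
  simp [pvFoldA_eq]
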